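-- pv_equiv track=rewrite | github.com/shreyshNair/Zenthera | aiModel/step2_preprocess.py | dna_to_kmers
-- ===== SOURCE A (Python) =====
-- def dna_to_kmers(seq: str, k: int) -> str:
--     """
--     Convert a DNA sequence string to a space-joined string of k-mers.
--     Skips any k-mer containing 'N' (ambiguous bases).
--
--     e.g. 'ACGTACGT', k=3 → 'ACG CGT GTA TAC ACG CGT'
--     """
--     seq = seq.upper()
--     kmers = [
--         seq[i : i + k]
--         for i in range(len(seq) - k + 1)
--         if "N" not in seq[i : i + k]
--     ]
--     return " ".join(kmers)
-- ===== SOURCE B (Python) =====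
-- def dna_to_kmers(seq: str, k: int) -> str:
--     """Space-joined k-mers of seq (uppercased), skipping windows containing 'N'.
--
--     Builds a prefix table of 'N' counts once; a window is N-free iff the count
--     is unchanged across its span, so no window is ever rescanned for 'N'."""
--     seq = seq.upper()
--     pref = [0]
--     for c in seq:
--         pref.append(pref[-1] + (c == 'N'))
--     kmers = [seq[i : i + k] for i in range(len(seq) - k + 1) if pref[i + k] == pref[i]]
--     return " ".join(kmers)
-- ===== Notes on version B (the rewrite author's own statement) =====
-- stated objective: alternative
-- what changed: Replaces the per-window 'N' membership scan with a prefix table of 'N' counts built in one pass, so each window is accepted by comparing two prefix counts instead of being searched; Pre_ excludes negative k, where every window is empty, A returns an accidental run of spaces and B's prefix-table lookup goes out of range and raises IndexError.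
-- outside the precondition, e.g. on dna_to_kmers('A', -1): A returns '  ', B raises IndexError
import Mathlib
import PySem

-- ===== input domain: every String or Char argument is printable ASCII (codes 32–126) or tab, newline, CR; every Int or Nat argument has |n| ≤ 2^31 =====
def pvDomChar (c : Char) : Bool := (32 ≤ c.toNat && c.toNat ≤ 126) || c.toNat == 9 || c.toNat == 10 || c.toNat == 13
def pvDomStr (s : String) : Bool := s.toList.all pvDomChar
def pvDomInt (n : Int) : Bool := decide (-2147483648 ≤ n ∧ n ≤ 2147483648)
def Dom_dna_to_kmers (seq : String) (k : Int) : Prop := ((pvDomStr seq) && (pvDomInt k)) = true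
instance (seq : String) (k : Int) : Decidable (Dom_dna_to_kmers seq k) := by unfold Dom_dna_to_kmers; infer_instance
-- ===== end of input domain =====

-- B replaces A's per-window 'N' membership scan with a prefix table of 'N' counts built in one
-- pass; each window is accepted by comparing two prefix counts.

-- ===== PORT A =====
def dna_to_kmers (seq : String) (k : Int) : String :=
  let s := PySem.Str.upper seq
  let kmers := (PySem.List.pyRange 0 ((PySem.Str.len s) - k + 1) 1).filterMap
    (fun i =>
      let w := PySem.Str.slice s (some i) (some (i + k))
      if PySem.Str.isIn "N" w then none else some w)
  PySem.Str.join " " kmers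

-- ===== PORT B =====
def dna_to_kmers_alt (seq : String) (k : Int) : String :=
  let s := PySem.Str.upper seq
  let pref : List Int := s.toList.foldl
    (fun p c => p ++ [PySem.List.pyGetD p (-1) 0 + (if c == 'N' then 1 else 0)]) [0]
  let kmers := (PySem.List.pyRange 0 ((PySem.Str.len s) - k + 1) 1).filterMap
    (fun i =>
      if PySem.List.pyGetD pref (i + k) 0 == PySem.List.pyGetD pref i 0
      then some (PySem.Str.slice s (some i) (some (i + k))) else none)
  PySem.Str.join " " kmers

-- ===== PRECONDITION & SPEC =====
-- Pre_ excludes negative k, where every window is empty, A returns an accidental run of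
-- spaces, and B's prefix-table lookup goes out of range and raises IndexError.
def Pre_dna_to_kmers (seq : String) (k : Int) : Prop := 0 ≤ k
instance (seq : String) (k : Int) : Decidable (Pre_dna_to_kmers seq k) := by
  unfold Pre_dna_to_kmers; infer_instance

def pvWitness_dna_to_kmers : String × Int := ("ACGNTACG", 3)

def Spec_dna_to_kmers (seq : String) (k : Int) (out : String) : Prop := out = dna_to_kmers_alt seq k
instance (seq : String) (k : Int) (out : String) : Decidable (Spec_dna_to_kmers seq k out) := by
  unfold Spec_dna_to_kmers; infer_instance

-- ===== CLAIM (what is proved, stated in full; the proofs are below) =====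
def Claim_equal_dna_to_kmers : Prop := ∀ (seq : String) (k : Int), Dom_dna_to_kmers seq k → Pre_dna_to_kmers seq k → Spec_dna_to_kmers seq k (dna_to_kmers seq k)

-- ===== LEMMAS AND PROOFS =====

-- B's first loop builds exactly the list of 'N'-counts of the prefixes of L.
theorem pv_pref_eq (L : List Char) :
    L.foldl (fun p c => p ++ [PySem.List.pyGetD p (-1) 0 + (if c == 'N' then 1 else 0)]) [0]
      = (List.range (L.length + 1)).map (fun j => ((L.take j).count 'N' : Int)) := by
  induction L using List.reverseRecOn with
  | nil => simp [PySem.List.pyGetD, PySem.List.pyGet?, PySem.List.pyIdx?]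
  | append_singleton L c ih =>
    rw [List.foldl_append, ih]
    simp only [List.foldl_cons, List.foldl_nil]
    conv_rhs => rw [List.length_append, List.length_singleton, List.range_succ, List.map_append]
    congr 1
    · apply List.map_congr_left
      intro j hj
      rw [List.mem_range] at hj
      rw [List.take_append_of_le_length (by omega)]
    · have hlast : PySem.List.pyGetD ((List.range (L.length + 1)).map (fun j => ((L.take j).count 'N' : Int))) (-1) 0
          = ((L.take L.length).count 'N' : Int) := by
        simp [PySem.List.pyGetD, PySem.List.pyGet?, PySem.List.pyIdx?, List.getElem?_map]
      rw [List.map_singleton, hlast]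
      have htake : List.take (L.length + 1) (L ++ [c]) = L ++ [c] := List.take_of_length_le (by simp)
      rw [htake, List.count_append, List.take_length]
      by_cases hc : c = 'N' <;> simp [hc]

-- Reading the prefix list at a nonnegative in-range index gives the prefix count.
theorem pv_pref_get (L : List Char) (j : Int) (h0 : 0 ≤ j) (hn : j ≤ (L.length : Int)) :
    PySem.List.pyGetD
      ((List.range (L.length + 1)).map (fun j => ((L.take j).count 'N' : Int))) j 0
      = ((L.take j.toNat).count 'N' : Int) := by
  rw [PySem.List.pyGetD_of_nonneg _ _ h0]
  have hj : j.toNat < L.length + 1 := by omega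
  simp [List.getD, hj]

-- [a] is an infix iff a is a member.
theorem pv_singleton_infix {α : Type} (a : α) (l : List α) : [a] <:+: l ↔ a ∈ l := by
  constructor
  · intro h; exact h.mem (List.mem_singleton_self a)
  · intro h
    obtain ⟨s, t, rfl⟩ := List.append_of_mem h
    exact ⟨s, t, by simp⟩

-- clampIdx of a nonnegative in-range index is the index itself.
theorem pv_clamp_eq (i : Int) (n : Nat) (h0 : 0 ≤ i) (h1 : i ≤ (n : Int)) :
    ((PySem.List.clampIdx n i : Nat) : Int) = i := by
  simp only [PySem.List.clampIdx]
  repeat' split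
  all_goals omega

-- The prefix count is constant across the window's span iff the window has no 'N'.
theorem pv_window (L : List Char) (i k : Int) :
    (((L.take (PySem.List.clampIdx L.length i
          + (PySem.List.clampIdx L.length (i+k) - PySem.List.clampIdx L.length i))).count 'N' : Int)
        = ((L.take (PySem.List.clampIdx L.length i)).count 'N' : Int))
      ↔ 'N' ∉ PySem.List.slice L (some i) (some (i+k)) := by
  have hsl : PySem.List.slice L (some i) (some (i+k))
      = (L.drop (PySem.List.clampIdx L.length i)).take
          (PySem.List.clampIdx L.length (i+k) - PySem.List.clampIdx L.length i) := by
    simp [PySem.List.slice]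
  rw [hsl, List.take_add, List.count_append, ← List.count_eq_zero (a := 'N')]
  push_cast
  omega

theorem pv_main (seq : String) (k : Int) (hk : 0 ≤ k) :
    dna_to_kmers seq k = dna_to_kmers_alt seq k := by
  simp only [dna_to_kmers, dna_to_kmers_alt, pv_pref_eq]
  congr 1
  apply List.filterMap_congr
  intro i hi
  rw [PySem.List.mem_pyRange_one] at hi
  obtain ⟨hi0, hi1⟩ := hi
  set s := PySem.Str.upper seq with hs
  have hn : (PySem.Str.len s) = (s.toList.length : Int) := by rw [PySem.Str.len_eq]
  have hiLe : i ≤ (s.toList.length : Int) := by omega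
  have hikLe : i + k ≤ (s.toList.length : Int) := by omega
  set a := PySem.List.clampIdx s.toList.length i with ha
  set b := PySem.List.clampIdx s.toList.length (i+k) with hb
  have haEq : ((a : Nat) : Int) = i := pv_clamp_eq i s.toList.length hi0 hiLe
  have hbEq : ((b : Nat) : Int) = i + k := pv_clamp_eq (i+k) s.toList.length (by omega) hikLe
  have hiNat : i.toNat = a := by omega
  have hikNat : (i + k).toNat = a + (b - a) := by omega
  rw [pv_pref_get s.toList (i + k) (by omega) hikLe,
    pv_pref_get s.toList i hi0 hiLe, hiNat, hikNat]
  have hIn : PySem.Chars.isIn ['N'] (PySem.List.slice s.toList (some i) (some (i + k))) = true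
      ↔ 'N' ∈ PySem.List.slice s.toList (some i) (some (i + k)) := by
    rw [PySem.Chars.isIn_iff_infix, pv_singleton_infix]
  by_cases hmem : 'N' ∈ PySem.List.slice s.toList (some i) (some (i + k))
  · have h1 : PySem.Chars.isIn ['N'] (PySem.List.slice s.toList (some i) (some (i + k))) = true :=
      hIn.mpr hmem
    have h2 : ¬ (((s.toList.take (a + (b - a))).count 'N' : Int)
        = ((s.toList.take a).count 'N' : Int)) := by
      rw [ha, hb, pv_window s.toList i k]; simpa using hmem
    simp [h1, h2]
  · have h1 : PySem.Chars.isIn ['N'] (PySem.List.slice s.toList (some i) (some (i + k))) = false := by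
      rw [← Bool.not_eq_true, hIn]; exact hmem
    have h2 : (((s.toList.take (a + (b - a))).count 'N' : Int)
        = ((s.toList.take a).count 'N' : Int)) := by
      rw [ha, hb, pv_window s.toList i k]; exact hmem
    simp [h1, h2]

-- ===== VERDICT (by name: the statement is the Claim_ definition above) =====
theorem dna_to_kmers_spec : Claim_equal_dna_to_kmers := by
  intro seq k _ hk
  exact pv_main seq k hk
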